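-- pv_equiv track=rewrite | github.com/ekarth/AutomatedChequeProcessing | validate/cheque_number.py | validate_cheque_number
-- ===== SOURCE A (Python) =====
-- def validate_cheque_number(chq_num):
--
--     cheque_num = ''
--     for d in chq_num:
--
--         if d.isdigit():
--             cheque_num += d
--
--         if d == 'O' or d == 'o':
--             cheque_num += '0'
--
--         elif d == 'l' or d == 'I' or d == 'i':
--             cheque_num += '1'
--
--         elif d == 'T':
--             cheque_num += '7'
--
--     return int(cheque_num[1: 7])
-- ===== SOURCE B (Python) =====
-- OCR_DIGITS = {'O': '0', 'o': '0', 'l': '1', 'I': '1', 'i': '1', 'T': '7'}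
--
--
-- def validate_cheque_number(chq_num):
--     # Bounded scan: walk the string only until the 7th cheque digit is found,
--     # skipping the first one as it is found (no full digit string, no slice).
--     collected = []
--     seen = 0
--     i = 0
--     while i < len(chq_num) and seen < 7:
--         d = chq_num[i]
--         if d.isdigit():
--             if seen:
--                 collected.append(d)
--             seen += 1
--         elif d in OCR_DIGITS:
--             if seen:
--                 collected.append(OCR_DIGITS[d])
--             seen += 1
--         i += 1
--     return int(''.join(collected))
-- ===== Notes on version B (the rewrite author's own statement) =====
-- stated objective: alternative
-- what changed: A scans the whole string building the full normalized digit string and then slices [1:7]; B is an early-terminating bounded scan that stops at the 7th cheque digit and collects only the 2nd-7th as it goes, never materializing the full digit string or slicing.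
import Mathlib
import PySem

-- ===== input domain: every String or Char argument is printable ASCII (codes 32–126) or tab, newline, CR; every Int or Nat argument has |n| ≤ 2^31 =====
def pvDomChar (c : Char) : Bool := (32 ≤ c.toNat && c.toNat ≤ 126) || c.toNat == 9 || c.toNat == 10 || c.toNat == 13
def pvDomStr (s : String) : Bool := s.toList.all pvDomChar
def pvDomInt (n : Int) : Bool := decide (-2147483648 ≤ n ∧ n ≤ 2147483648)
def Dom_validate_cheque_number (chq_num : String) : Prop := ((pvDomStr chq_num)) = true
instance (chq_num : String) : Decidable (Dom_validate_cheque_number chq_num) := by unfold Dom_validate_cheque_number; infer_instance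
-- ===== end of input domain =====

-- B stops scanning at the 7th cheque digit and collects only the 2nd-7th as it goes,
-- instead of A's full normalize-everything pass followed by a [1:7] slice (alternative decomposition).

-- ===== PORT A =====
-- one iteration of A's loop body: the digit test, then the O/o, l/I/i, T chain
def pvStepA (acc : List Char) (d : Char) : List Char :=
  let acc := if PySem.Chars.isdigit d then acc ++ [d] else acc
  if d == 'O' || d == 'o' then acc ++ ['0']
  else if d == 'l' || d == 'I' || d == 'i' then acc ++ ['1']
  else if d == 'T' then acc ++ ['7']
  else acc

def validate_cheque_number (chq_num : String) : Int :=
  let cheque_num := chq_num.toList.foldl pvStepA []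
  (PySem.Int.ofChars? (PySem.List.slice cheque_num (some 1) (some 7))).getD 0

-- ===== PORT B =====
-- the module-level OCR_DIGITS dict
def pvOCR : PySem.Dict Char Char :=
  PySem.Dict.ofList [('O', '0'), ('o', '0'), ('l', '1'), ('I', '1'), ('i', '1'), ('T', '7')]

-- the while loop: one recursive step per iteration (i < len ↔ the list is a cons)
def pvGoB : List Char → Nat → List Char
  | [], _ => []
  | d :: t, seen =>
    if seen < 7 then
      if PySem.Chars.isdigit d then
        (if seen ≠ 0 then [d] else []) ++ pvGoB t (seen + 1)
      else if PySem.Dict.contains pvOCR d then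
        (if seen ≠ 0 then [PySem.Dict.getD pvOCR d d] else []) ++ pvGoB t (seen + 1)
      else pvGoB t seen
    else []

def validate_cheque_number_alt (chq_num : String) : Int :=
  (PySem.Int.ofChars? (pvGoB chq_num.toList 0)).getD 0

-- ===== PRECONDITION & SPEC =====
-- Pre_ excludes exactly the inputs with fewer than two digit/OCR-letter characters,
-- on which both Pythons raise ValueError (int is applied to an empty string).
def Pre_validate_cheque_number (chq_num : String) : Prop :=
  2 ≤ (chq_num.toList.filter
        (fun c => PySem.Chars.isdigit c || c ∈ ['O', 'o', 'l', 'I', 'i', 'T'])).length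
instance (chq_num : String) : Decidable (Pre_validate_cheque_number chq_num) := by
  unfold Pre_validate_cheque_number; infer_instance
def pvWitness_validate_cheque_number : String := "1T2o3"

def Spec_validate_cheque_number (chq_num : String) (out : Int) : Prop := out = validate_cheque_number_alt chq_num
instance (chq_num : String) (out : Int) : Decidable (Spec_validate_cheque_number chq_num out) := by unfold Spec_validate_cheque_number; infer_instance

-- ===== CLAIM (what is proved, stated in full; the proofs are below) =====
def Claim_equal_validate_cheque_number : Prop := ∀ (chq_num : String), Dom_validate_cheque_number chq_num → Pre_validate_cheque_number chq_num → Spec_validate_cheque_number chq_num (validate_cheque_number chq_num)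

-- ===== LEMMAS AND PROOFS =====

-- the per-character OCR normalization both algorithms implement
def pvTrans (c : Char) : Char :=
  if c == 'O' || c == 'o' then '0'
  else if c == 'l' || c == 'I' || c == 'i' then '1'
  else if c == 'T' then '7'
  else c

-- the full normalized digit list A builds
def pvDigitsOf (l : List Char) : List Char :=
  (l.filter (fun d => PySem.Chars.isdigit (pvTrans d))).map pvTrans

-- one step of A's loop appends exactly the translated character when it is a digit
theorem pvStepA_eq (acc : List Char) (d : Char) :
    pvStepA acc d =
      if PySem.Chars.isdigit (pvTrans d) then acc ++ [pvTrans d] else acc := by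
  by_cases hO : d = 'O' <;> by_cases ho : d = 'o' <;> by_cases hl : d = 'l' <;>
    by_cases hI : d = 'I' <;> by_cases hi : d = 'i' <;> by_cases hT : d = 'T' <;>
    simp_all [pvStepA, pvTrans, PySem.Chars.isdigit]

theorem pvFold_eq (l : List Char) (acc : List Char) :
    l.foldl pvStepA acc = acc ++ pvDigitsOf l := by
  induction l generalizing acc with
  | nil => simp [pvDigitsOf]
  | cons d t ih =>
    rw [List.foldl_cons, pvStepA_eq]
    by_cases h : PySem.Chars.isdigit (pvTrans d) = true <;>
      simp [pvDigitsOf, h, ih]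

-- one step of B's loop, phrased through the common normalization pvTrans
theorem pvOCR_contains_false (d : Char) (hO : ¬d = 'O') (ho : ¬d = 'o') (hl : ¬d = 'l')
    (hI : ¬d = 'I') (hi : ¬d = 'i') (hT : ¬d = 'T') :
    PySem.Dict.contains pvOCR d = false := by
  have h : pvOCR = PySem.Dict.mk
      [('O', '0'), ('o', '0'), ('l', '1'), ('I', '1'), ('i', '1'), ('T', '7')] := rfl
  rw [h]
  simp [PySem.Dict.contains_mk]
  exact ⟨Ne.symm hO, Ne.symm ho, Ne.symm hl, Ne.symm hI, Ne.symm hi, Ne.symm hT⟩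

theorem pvGoB_cons (d : Char) (t : List Char) (seen : Nat) :
    pvGoB (d :: t) seen =
      if seen < 7 then
        if PySem.Chars.isdigit (pvTrans d) then
          (if seen ≠ 0 then [pvTrans d] else []) ++ pvGoB t (seen + 1)
        else pvGoB t seen
      else [] := by
  by_cases hO : d = 'O' <;> by_cases ho : d = 'o' <;> by_cases hl : d = 'l' <;>
    by_cases hI : d = 'I' <;> by_cases hi : d = 'i' <;> by_cases hT : d = 'T' <;>
    first
      | (exfalso; simp_all; done)
      | (subst_vars
         simp [pvGoB, pvTrans,
           (by decide : PySem.Chars.isdigit 'O' = false),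
           (by decide : PySem.Chars.isdigit 'o' = false),
           (by decide : PySem.Chars.isdigit 'l' = false),
           (by decide : PySem.Chars.isdigit 'I' = false),
           (by decide : PySem.Chars.isdigit 'i' = false),
           (by decide : PySem.Chars.isdigit 'T' = false),
           (by decide : PySem.Chars.isdigit '0' = true),
           (by decide : PySem.Chars.isdigit '1' = true),
           (by decide : PySem.Chars.isdigit '7' = true),
           (by decide : PySem.Dict.contains pvOCR 'O' = true),
           (by decide : PySem.Dict.contains pvOCR 'o' = true),
           (by decide : PySem.Dict.contains pvOCR 'l' = true),
           (by decide : PySem.Dict.contains pvOCR 'I' = true),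
           (by decide : PySem.Dict.contains pvOCR 'i' = true),
           (by decide : PySem.Dict.contains pvOCR 'T' = true),
           (by decide : PySem.Dict.getD pvOCR 'O' 'O' = '0'),
           (by decide : PySem.Dict.getD pvOCR 'o' 'o' = '0'),
           (by decide : PySem.Dict.getD pvOCR 'l' 'l' = '1'),
           (by decide : PySem.Dict.getD pvOCR 'I' 'I' = '1'),
           (by decide : PySem.Dict.getD pvOCR 'i' 'i' = '1'),
           (by decide : PySem.Dict.getD pvOCR 'T' 'T' = '7')]
         done)
      | simp [pvGoB, pvTrans, hO, ho, hl, hI, hi, hT, pvOCR_contains_false d hO ho hl hI hi hT]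

-- once one digit has been seen, B collects exactly the next 7 - seen digits
theorem pvGoB_pos (l : List Char) (seen : Nat) (h : 1 ≤ seen) :
    pvGoB l seen = (pvDigitsOf l).take (7 - seen) := by
  induction l generalizing seen with
  | nil => simp [pvGoB, pvDigitsOf]
  | cons d t ih =>
    rw [pvGoB_cons]
    by_cases h7 : seen < 7
    · by_cases hd : PySem.Chars.isdigit (pvTrans d) = true
      · have : pvDigitsOf (d :: t) = pvTrans d :: pvDigitsOf t := by
          simp [pvDigitsOf, hd]
        have h1 : seen ≠ 0 := by omega
        have h2 : 7 - seen = (7 - (seen + 1)) + 1 := by omega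
        rw [this, h2]
        simp only [h7, hd, h1, ne_eq, not_false_iff, if_pos, List.take_succ_cons,
          List.singleton_append]
        rw [ih _ (by omega)]
      · have : pvDigitsOf (d :: t) = pvDigitsOf t := by
          simp [pvDigitsOf, hd]
        simp [h7, hd, this, ih _ h]
    · have h0 : 7 - seen = 0 := by omega
      simp [h7, h0]

-- from a fresh start B collects digits 2..7, i.e. drop 1 then take 6
theorem pvGoB_zero (l : List Char) :
    pvGoB l 0 = ((pvDigitsOf l).drop 1).take 6 := by
  induction l with
  | nil => simp [pvGoB, pvDigitsOf]
  | cons d t ih =>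
    rw [pvGoB_cons]
    by_cases hd : PySem.Chars.isdigit (pvTrans d) = true
    · have : pvDigitsOf (d :: t) = pvTrans d :: pvDigitsOf t := by
        simp [pvDigitsOf, hd]
      rw [this]
      simp [hd, pvGoB_pos t 1 (by omega)]
    · have : pvDigitsOf (d :: t) = pvDigitsOf t := by
        simp [pvDigitsOf, hd]
      simp [hd, this, ih]

-- ===== VERDICT (by name: the statement is the Claim_ definition above) =====
theorem validate_cheque_number_spec : Claim_equal_validate_cheque_number := by
  intro chq_num _ _
  unfold Spec_validate_cheque_number validate_cheque_number validate_cheque_number_alt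
  rw [pvFold_eq, pvGoB_zero, List.nil_append]
  norm_num [PySem.List.slice_toNat]
  rw [show Int.toNat 7 = 7 from rfl]
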